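-- pv_equiv track=rewrite | github.com/hyuntae99/Algorithm | Python3/프로그래머스/2/72411. 메뉴 리뉴얼/메뉴 리뉴얼.py | solution
-- ===== SOURCE A (Python) =====
-- from collections import Counter
-- from itertools import combinations
--
-- def solution(orders, course):
--     result = []
--
--     for c in course:
--         comb_counter = Counter()  # 조합을 저장할 Counter
--         for order in orders:
--             order = sorted(order)
--             # c개의 메뉴 조합을 찾아 Counter에 추가
--             # (A,C) : 4 / (C,D) : 3 ...
--             comb_counter.update(combinations(order, c))
--
--         # 가장 많이 나온 조합이 2번 이상일 때만 결과에 추가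
--         if comb_counter:
--             max_count = max(comb_counter.values())
--             if max_count > 1:
--                 for comb in comb_counter:
--                     if comb_counter[comb] == max_count:
--                         result.append(''.join(comb))
--
--     return sorted(result)  # 최종 결과는 사전 순 정렬
-- ===== SOURCE B (Python) =====
-- from itertools import combinations, groupby
--
-- def solution(orders, course):
--     # sort-then-scan instead of hash counting: per course size, collect all
--     # combinations into one list, sort it, and find the most frequent ones by
--     # scanning runs of equal neighbours (groupby) -- no Counter at all.
--     result = []
--     for c in course:
--         combos = []
--         for order in orders:
--             combos.extend(combinations(sorted(order), c))
--         combos.sort()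
--         best = 1
--         winners = []
--         for key, grp in groupby(combos):
--             run = sum(1 for _ in grp)
--             if run > best:
--                 best = run
--                 winners = [key]
--             elif run == best and best > 1:
--                 winners.append(key)
--         result.extend(''.join(w) for w in winners)
--     return sorted(result)
-- ===== Notes on version B (the rewrite author's own statement) =====
-- stated objective: alternative
-- what changed: B replaces A's hash-counting (a Counter per course size, then a max over its values) by sort-then-scan: per course size it collects all combinations into one list, sorts it, and extracts the most frequent combinations by scanning runs of equal neighbours with groupby; no Counter/dict is used at all.
import Mathlib
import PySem

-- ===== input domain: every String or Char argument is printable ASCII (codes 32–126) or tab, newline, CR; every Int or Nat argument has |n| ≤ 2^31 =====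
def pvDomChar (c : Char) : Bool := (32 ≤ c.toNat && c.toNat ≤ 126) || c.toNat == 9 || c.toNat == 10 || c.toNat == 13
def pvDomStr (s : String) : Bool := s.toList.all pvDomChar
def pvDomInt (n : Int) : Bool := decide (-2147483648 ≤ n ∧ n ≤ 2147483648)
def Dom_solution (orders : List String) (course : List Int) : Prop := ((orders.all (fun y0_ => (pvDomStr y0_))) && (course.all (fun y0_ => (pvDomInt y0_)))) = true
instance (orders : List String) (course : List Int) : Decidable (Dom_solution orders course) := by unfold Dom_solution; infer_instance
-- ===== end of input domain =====

-- B replaces A's hash counting (a Counter per course size, then a max over its values) by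
-- sort-then-scan: per course size it sorts the list of all combinations and extracts the most
-- frequent ones by scanning runs of equal neighbours (groupby); objective: alternative algorithm.

-- ===== PORT A =====
-- Counter.update(iterable): add 1 for each element
def counterUpdate (d : PySem.Dict (List Char) Int) (l : List (List Char)) : PySem.Dict (List Char) Int :=
  l.foldl (fun d x => d.modify x 0 (· + 1)) d

def solution (orders : List String) (course : List Int) : List String :=
  let result := course.foldl (fun result c =>
    let cc := orders.foldl (fun cc order =>
        counterUpdate cc (PySem.List.combinations (PySem.List.sorted order.toList (fun x => x)) c.toNat))
      PySem.Dict.empty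
    if cc.items = [] then result
    else
      let maxCount := (PySem.List.max? cc.values (fun x => x)).getD 0
      if 1 < maxCount then
        cc.keys.foldl (fun r k => if cc.getD k 0 = maxCount then r ++ [String.ofList k] else r) result
      else result) []
  PySem.List.sorted result (fun x => x)

-- ===== PORT B =====
-- 'for key, grp in groupby(combos): run = sum(1 for _ in grp); <loop body on (best, winners)>'
-- ported by hand, step for step: each recursion step consumes one maximal run of equal
-- neighbours (key = its first element, run = its length) and applies the Python loop body;
-- exact for itertools.groupby consumed this way on a list.
def groupScan : List (List Char) → Int → List (List Char) → Int × List (List Char)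
  | [], best, winners => (best, winners)
  | x :: rest, best, winners =>
      let run : Int := 1 + (rest.takeWhile (fun y => y == x)).length
      let tail := rest.dropWhile (fun y => y == x)
      if best < run then groupScan tail run [x]
      else if run = best ∧ 1 < best then groupScan tail best (winners ++ [x])
      else groupScan tail best winners
termination_by s _ _ => s.length
decreasing_by all_goals exact Nat.lt_succ_of_le (rest.length_dropWhile_le _)

def solution_alt (orders : List String) (course : List Int) : List String :=
  let result := course.foldl (fun result c =>
    let combos := orders.foldl (fun combos order =>
        combos ++ PySem.List.combinations (PySem.List.sorted order.toList (fun x => x)) c.toNat) []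
    let sortedCombos := PySem.List.sorted combos (fun x => x)
    let bw := groupScan sortedCombos 1 []
    result ++ bw.2.map (fun w => String.ofList w)) []
  PySem.List.sorted result (fun x => x)

-- ===== PRECONDITION & SPEC =====
-- Pre_ excludes a negative course size when there is at least one order: there Python's
-- itertools.combinations raises ValueError in A and in B alike; with no orders neither reaches it.
def Pre_solution (orders : List String) (course : List Int) : Prop := orders ≠ [] → ∀ c ∈ course, 0 ≤ c
instance (orders : List String) (course : List Int) : Decidable (Pre_solution orders course) := by unfold Pre_solution; infer_instance
def pvWitness_solution : List String × List Int := (["abc", "ac"], [2])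
def Spec_solution (orders : List String) (course : List Int) (out : List String) : Prop := out = solution_alt orders course
instance (orders : List String) (course : List Int) (out : List String) : Decidable (Spec_solution orders course out) := by unfold Spec_solution; infer_instance

-- ===== CLAIM (what is proved, stated in full; the proofs are below) =====
def Claim_equal_solution : Prop := ∀ (orders : List String) (course : List Int), Dom_solution orders course → Pre_solution orders course → Spec_solution orders course (solution orders course)

-- ===== LEMMAS AND PROOFS =====

-- the combinations of one order at size c (shared subterm of both ports)
def gen (c : Int) (order : String) : List (List Char) :=
  PySem.List.combinations (PySem.List.sorted order.toList (fun x => x)) c.toNat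

-- all combinations at size c, in A's/B's generation order
def Lc (orders : List String) (c : Int) : List (List Char) := orders.flatMap (gen c)

-- what A appends to result for one course entry c
def contribA (orders : List String) (c : Int) : List String :=
  let cc := PySem.Dict.counter (Lc orders c)
  if cc.items = [] then []
  else
    let m := (PySem.List.max? cc.values (fun x => x)).getD 0
    if 1 < m then (cc.keys.filter (fun k => decide (cc.getD k 0 = m))).map String.ofList
    else []

-- what B appends to result for one course entry c
def contribB (orders : List String) (c : Int) : List String :=
  (groupScan (PySem.List.sorted (Lc orders c) (fun x => x)) 1 []).2.map String.ofList

-- max run length of equal neighbours, and the heads of the runs of length t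
def runMax : List (List Char) → Nat
  | [] => 0
  | x :: rest => max (1 + (rest.takeWhile (fun y => y == x)).length)
      (runMax (rest.dropWhile (fun y => y == x)))
termination_by s => s.length
decreasing_by exact Nat.lt_succ_of_le (rest.length_dropWhile_le _)

def runHeads : List (List Char) → Nat → List (List Char)
  | [], _ => []
  | x :: rest, t =>
      (if 1 + (rest.takeWhile (fun y => y == x)).length = t then [x] else [])
        ++ runHeads (rest.dropWhile (fun y => y == x)) t
termination_by s _ => s.length
decreasing_by exact Nat.lt_succ_of_le (rest.length_dropWhile_le _)

theorem runHeads_cons (x : List Char) (rest : List (List Char)) (t : Nat) :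
    runHeads (x :: rest) t =
      (if 1 + (rest.takeWhile (fun y => y == x)).length = t then [x] else [])
        ++ runHeads (rest.dropWhile (fun y => y == x)) t := by
  rw [runHeads]

theorem runMax_cons (x : List Char) (rest : List (List Char)) :
    runMax (x :: rest) = max (1 + (rest.takeWhile (fun y => y == x)).length)
      (runMax (rest.dropWhile (fun y => y == x))) := by
  rw [runMax]

theorem groupScan_ge_two : ∀ (s : List (List Char)) (best : Int) (winners : List (List Char)),
    2 ≤ best →
    groupScan s best winners =
      ((max best ((runMax s : Int))),
       if best < (runMax s : Int) then runHeads s (runMax s)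
       else winners ++ runHeads s best.toNat) := by
  intro s
  induction s using runMax.induct with
  | case1 =>
    intro best winners hb
    simp only [groupScan, runMax, runHeads, Nat.cast_zero, List.append_nil]
    rw [if_neg (by omega), max_eq_left (by omega)]
  | case2 x rest ih =>
    intro best winners hb
    rw [groupScan]
    set r := (rest.takeWhile (fun y => y == x)).length with hr
    set tail := rest.dropWhile (fun y => y == x) with htail
    set M := runMax tail with hM
    simp only [runMax_cons, runHeads_cons, ← hr, ← htail, ← hM]
    by_cases h1 : best < 1 + (r : Int)
    · rw [if_pos h1, ih _ _ (by omega)]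
      by_cases hm : 1 + r < M
      · rw [if_pos (show (1:Int)+(r:Int) < (M:Int) by exact_mod_cast hm), if_pos (by push_cast; omega),
          Prod.mk.injEq]
        refine ⟨by push_cast; omega, ?_⟩
        rw [max_eq_right (by omega), if_neg (by omega), List.nil_append]
      · have h1r : ((1:Int) + (r:Int)).toNat = 1 + r := by omega
        rw [if_neg (by omega), if_pos (by push_cast; omega), Prod.mk.injEq]
        refine ⟨by push_cast; omega, ?_⟩
        rw [max_eq_left (by omega), if_pos rfl, h1r]
    · rw [if_neg h1]
      by_cases h2 : 1 + (r:Int) = best ∧ 1 < best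
      · obtain ⟨h2a, h2b⟩ := h2
        rw [if_pos ⟨h2a, h2b⟩, ih _ _ hb]
        by_cases hm : best < (M:Int)
        · rw [if_pos hm, if_pos (by push_cast; omega), Prod.mk.injEq]
          refine ⟨by push_cast; omega, ?_⟩
          rw [max_eq_right (by omega), if_neg (by omega), List.nil_append]
        · rw [if_neg hm, if_neg (by push_cast; omega), Prod.mk.injEq]
          refine ⟨by push_cast; omega, ?_⟩
          rw [if_pos (by omega), List.append_assoc]
      · have hne : 1 + (r:Int) ≠ best := fun h => h2 ⟨h, by omega⟩
        rw [if_neg h2, ih _ _ hb]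
        by_cases hm : best < (M:Int)
        · rw [if_pos hm, if_pos (by push_cast; omega), Prod.mk.injEq]
          refine ⟨by push_cast; omega, ?_⟩
          rw [max_eq_right (by omega), if_neg (by omega), List.nil_append]
        · rw [if_neg hm, if_neg (by push_cast; omega), Prod.mk.injEq]
          refine ⟨by push_cast; omega, ?_⟩
          rw [if_neg (by omega), List.nil_append]

theorem groupScan_one : ∀ (s : List (List Char)),
    groupScan s 1 [] =
      (((max 1 (runMax s) : Nat) : Int), if 1 < runMax s then runHeads s (runMax s) else []) := by
  intro s
  induction s using runMax.induct with
  | case1 =>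
    simp only [groupScan, runMax, runHeads]
    rw [if_neg (by omega)]
    rfl
  | case2 x rest ih =>
    rw [groupScan]
    set r := (rest.takeWhile (fun y => y == x)).length with hr
    set tail := rest.dropWhile (fun y => y == x) with htail
    set M := runMax tail with hM
    simp only [runMax_cons, runHeads_cons, ← hr, ← htail, ← hM]
    by_cases h1 : 0 < r
    · rw [if_pos (by omega), groupScan_ge_two tail _ _ (by omega)]
      by_cases hm : 1 + r < M
      · rw [if_pos (by omega), if_pos (by omega), Prod.mk.injEq]
        refine ⟨by push_cast; omega, ?_⟩
        rw [max_eq_right (by omega), if_neg (by omega), List.nil_append]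
      · have h1r : ((1:Int) + (r:Int)).toNat = 1 + r := by omega
        rw [if_neg (by omega), if_pos (by omega), Prod.mk.injEq]
        refine ⟨by push_cast; omega, ?_⟩
        rw [max_eq_left (by omega), if_pos rfl, h1r]
    · have hr0 : r = 0 := by omega
      rw [if_neg (by omega), if_neg (by simp), ih]
      by_cases hm : 1 < M
      · rw [if_pos hm, if_pos (by omega), Prod.mk.injEq]
        refine ⟨by push_cast; omega, ?_⟩
        rw [max_eq_right (by omega), if_neg (by omega), List.nil_append]
      · rw [if_neg hm, if_neg (by omega), Prod.mk.injEq]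
        exact ⟨by push_cast; omega, rfl⟩


theorem not_mem_dropWhile_sorted (x : List Char) (rest : List (List Char))
    (h : ∀ y ∈ rest, x ≤ y) (hp : rest.Pairwise (· ≤ ·)) :
    x ∉ rest.dropWhile (fun y => y == x) := by
  induction rest with
  | nil => simp
  | cons a t ih =>
    by_cases ha : (a == x) = true
    · rw [List.dropWhile_cons, if_pos ha]
      exact ih (fun y hy => h y (List.mem_cons_of_mem _ hy)) (List.Pairwise.of_cons hp)
    · rw [List.dropWhile_cons, if_neg ha]
      intro hmem
      rcases List.mem_cons.mp hmem with h1 | h1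
      · exact ha (by simp [h1])
      · have hax : a ≤ x := (List.pairwise_cons.mp hp).1 x h1
        have hxa : x ≤ a := h a (List.mem_cons_self)
        exact ha (by simp [le_antisymm hax hxa])

theorem run_facts (x : List Char) (rest : List (List Char))
    (hs : (x :: rest).Pairwise (· ≤ ·)) :
    ((x :: rest).count x = 1 + (rest.takeWhile (fun y => y == x)).length)
  ∧ (∀ k, k ≠ x → (x :: rest).count k = (rest.dropWhile (fun y => y == x)).count k)
  ∧ (rest.dropWhile (fun y => y == x)).Pairwise (· ≤ ·)
  ∧ (x ∉ rest.dropWhile (fun y => y == x))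
  ∧ (∀ k, k ∈ x :: rest ↔ k = x ∨ k ∈ rest.dropWhile (fun y => y == x)) := by
  obtain ⟨hhead, hp⟩ := List.pairwise_cons.mp hs
  have htw : ∀ y ∈ rest.takeWhile (fun y => y == x), y = x := by
    intro y hy
    have := List.mem_takeWhile_imp hy
    simpa using this
  have hnd : x ∉ rest.dropWhile (fun y => y == x) :=
    not_mem_dropWhile_sorted x rest hhead hp
  have hsplit : rest.takeWhile (fun y => y == x) ++ rest.dropWhile (fun y => y == x) = rest :=
    List.takeWhile_append_dropWhile
  refine ⟨?_, ?_, ?_, hnd, ?_⟩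
  · have h1 : (rest.takeWhile (fun y => y == x)).count x
        = (rest.takeWhile (fun y => y == x)).length :=
      List.count_eq_length.mpr (fun b hb => (htw b hb).symm)
    have h2 : (rest.dropWhile (fun y => y == x)).count x = 0 := List.count_eq_zero.mpr hnd
    have hr : rest.count x = (rest.takeWhile (fun y => y == x)).length := by
      conv_lhs => rw [← hsplit]
      rw [List.count_append, h1, h2, Nat.add_zero]
    rw [List.count_cons, hr]
    simp [Nat.add_comm]
  · intro k hk
    have h1 : (rest.takeWhile (fun y => y == x)).count k = 0 :=
      List.count_eq_zero.mpr (fun hmem => hk (htw k hmem))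
    have hr : rest.count k = (rest.dropWhile (fun y => y == x)).count k := by
      conv_lhs => rw [← hsplit]
      rw [List.count_append, h1, Nat.zero_add]
    rw [List.count_cons, hr]
    simp [Ne.symm hk]
  · exact List.Pairwise.sublist (List.dropWhile_sublist _) hp
  · intro k
    constructor
    · intro hmem
      rcases List.mem_cons.mp hmem with h1 | h1
      · exact Or.inl h1
      · conv at h1 => rw [← hsplit]
        rcases List.mem_append.mp h1 with h2 | h2
        · exact Or.inl (htw k h2)
        · exact Or.inr h2
    · rintro (rfl | h1)
      · exact List.mem_cons_self
      · exact List.mem_cons_of_mem _ ((List.dropWhile_sublist _).mem h1)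

theorem count_le_runMax : ∀ (s : List (List Char)), s.Pairwise (· ≤ ·) →
    ∀ k ∈ s, s.count k ≤ runMax s := by
  intro s
  induction s using runMax.induct with
  | case1 => intro _ k hk; simp at hk
  | case2 x rest ih =>
    intro hs k hk
    obtain ⟨hcx, hck, hpd, hnd, hmem⟩ := run_facts x rest hs
    rw [runMax_cons]
    by_cases hkx : k = x
    · subst hkx; rw [hcx]; exact le_max_left _ _
    · rcases (hmem k).mp hk with h | h
      · exact absurd h hkx
      · rw [hck k hkx]
        exact le_trans (ih hpd k h) (le_max_right _ _)

theorem exists_count_eq_runMax : ∀ (s : List (List Char)), s.Pairwise (· ≤ ·) → s ≠ [] →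
    ∃ k ∈ s, s.count k = runMax s := by
  intro s
  induction s using runMax.induct with
  | case1 => intro _ h; exact absurd rfl h
  | case2 x rest ih =>
    intro hs _
    obtain ⟨hcx, hck, hpd, hnd, hmem⟩ := run_facts x rest hs
    rw [runMax_cons]
    by_cases hd : rest.dropWhile (fun y => y == x) = []
    · refine ⟨x, List.mem_cons_self, ?_⟩
      rw [hcx, hd]
      simp [runMax]
    · by_cases hle : runMax (rest.dropWhile (fun y => y == x)) ≤ 1 + (rest.takeWhile (fun y => y == x)).length
      · exact ⟨x, List.mem_cons_self, by rw [hcx, max_eq_left hle]⟩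
      · obtain ⟨k, hk, hkc⟩ := ih hpd hd
        have hkx : k ≠ x := fun h => hnd (h ▸ hk)
        exact ⟨k, (hmem k).mpr (Or.inr hk), by rw [hck k hkx, hkc, max_eq_right (by omega)]⟩

theorem mem_runHeads : ∀ (s : List (List Char)), s.Pairwise (· ≤ ·) → ∀ (t : Nat) (k : List Char),
    (k ∈ runHeads s t ↔ k ∈ s ∧ s.count k = t) := by
  intro s
  induction s using runMax.induct with
  | case1 => intro _ t k; simp [runHeads]
  | case2 x rest ih =>
    intro hs t k
    obtain ⟨hcx, hck, hpd, hnd, hmem⟩ := run_facts x rest hs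
    rw [runHeads_cons]
    constructor
    · intro h
      rcases List.mem_append.mp h with h | h
      · have : k = x ∧ 1 + (rest.takeWhile (fun y => y == x)).length = t := by
          by_cases hc : 1 + (rest.takeWhile (fun y => y == x)).length = t
          · rw [if_pos hc] at h; simp at h; exact ⟨h, hc⟩
          · rw [if_neg hc] at h; simp at h
        obtain ⟨rfl, ht⟩ := this
        exact ⟨List.mem_cons_self, by rw [hcx, ht]⟩
      · obtain ⟨hk, hc⟩ := (ih hpd t k).mp h
        have hkx : k ≠ x := fun he => hnd (he ▸ hk)
        exact ⟨(hmem k).mpr (Or.inr hk), by rw [hck k hkx, hc]⟩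
    · rintro ⟨hk, hc⟩
      by_cases hkx : k = x
      · subst hkx
        rw [hcx] at hc
        exact List.mem_append.mpr (Or.inl (by rw [if_pos hc]; exact List.mem_singleton.mpr rfl))
      · rcases (hmem k).mp hk with h | h
        · exact absurd h hkx
        · exact List.mem_append.mpr (Or.inr ((ih hpd t k).mpr ⟨h, by rw [← hck k hkx, hc]⟩))

theorem nodup_runHeads : ∀ (s : List (List Char)), s.Pairwise (· ≤ ·) → ∀ (t : Nat),
    (runHeads s t).Nodup := by
  intro s
  induction s using runMax.induct with
  | case1 => intro _ t; simp [runHeads]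
  | case2 x rest ih =>
    intro hs t
    obtain ⟨hcx, hck, hpd, hnd, hmem⟩ := run_facts x rest hs
    rw [runHeads_cons]
    refine List.Nodup.append ?_ (ih hpd t) ?_
    · split <;> simp
    · intro a ha hb
      have hax : a = x := by
        by_cases hc : 1 + (rest.takeWhile (fun y => y == x)).length = t
        · rw [if_pos hc] at ha; simpa using ha
        · rw [if_neg hc] at ha; simp at ha
      subst hax
      exact hnd ((mem_runHeads _ hpd t a).mp hb).1

-- A's counter loop over all orders is Counter(all combinations at size c)
theorem counter_foldl (orders : List String) (c : Int) :
    orders.foldl (fun cc order =>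
        counterUpdate cc (PySem.List.combinations (PySem.List.sorted order.toList (fun x => x)) c.toNat))
      PySem.Dict.empty = PySem.Dict.counter (Lc orders c) := by
  rw [PySem.Dict.counter_eq_foldl]
  unfold Lc
  generalize PySem.Dict.empty = d
  induction orders generalizing d with
  | nil => simp
  | cons o rest ih =>
    simp only [List.foldl_cons, List.flatMap_cons, List.foldl_append]
    exact ih _

theorem solution_eq (orders : List String) (course : List Int) :
    solution orders course = PySem.List.sorted (course.flatMap (contribA orders)) (fun x => x) := by
  unfold solution
  rw [PySem.List.foldl_congr_mem _ _ (fun r c => r ++ contribA orders c) _ ?_]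
  · rw [PySem.List.foldl_append_eq_flatMap, List.nil_append]
  · intro acc c _
    dsimp only []
    rw [counter_foldl]
    unfold contribA
    dsimp only []
    split
    · simp
    · split
      · exact PySem.List.foldl_append_ite (fun k => (PySem.Dict.counter (Lc orders c)).getD k 0 =
          (PySem.List.max? (PySem.Dict.counter (Lc orders c)).values (fun x => x)).getD 0) String.ofList _ acc
      · simp

theorem solution_alt_eq (orders : List String) (course : List Int) :
    solution_alt orders course = PySem.List.sorted (course.flatMap (contribB orders)) (fun x => x) := by
  unfold solution_alt
  rw [PySem.List.foldl_congr_mem _ _ (fun r c => r ++ contribB orders c) _ ?_]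
  · rw [PySem.List.foldl_append_eq_flatMap, List.nil_append]
  · intro acc c _
    dsimp only []
    rw [PySem.List.foldl_append_eq_flatMap, List.nil_append]
    rfl

theorem sorted_pairwise_le (l : List (List Char)) :
    (PySem.List.sorted l (fun x => x)).Pairwise (· ≤ ·) := by
  have := PySem.List.sorted_pairwise (κ := List Char) l (fun x => x)
  convert this using 2

-- the heart: per course entry, A's max-count keys and B's maximal runs are the same set
theorem contrib_perm (orders : List String) (c : Int) :
    (contribA orders c).Perm (contribB orders c) := by
  unfold contribA contribB
  dsimp only []
  set L := Lc orders c with hL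
  set s := PySem.List.sorted L (fun x => x) with hs
  have hperm : s.Perm L := PySem.List.sorted_perm L _ _
  have hpair : s.Pairwise (· ≤ ·) := sorted_pairwise_le L
  have hcount : ∀ k : List Char, L.count k = s.count k := fun k => (hperm.count_eq k).symm
  have hmemLs : ∀ k : List Char, k ∈ L ↔ k ∈ s := fun k => hperm.mem_iff.symm
  simp only [groupScan_one s]
  rcases eq_or_ne L [] with hnil | hne
  · have hs0 : s = [] := by rw [hs, hnil]; rfl
    rw [hnil, hs0]
    simp [PySem.Dict.items_counter, runMax]
  · have hsne : s ≠ [] := fun h => hne ((PySem.List.sorted_eq_nil_iff L _ _).mp (hs ▸ h))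
    obtain ⟨a0, ha0⟩ := List.exists_mem_of_ne_nil L hne
    have hset : a0 ∈ PySem.Set.ofList L := (PySem.Set.mem_ofList L a0).mpr ha0
    have hitems : (PySem.Dict.counter L).items ≠ [] := by
      rw [PySem.Dict.items_counter]
      intro h
      rw [List.map_eq_nil_iff] at h
      rw [h] at hset
      simp at hset
    have hvals : (PySem.Dict.counter L).values
        = (PySem.Set.ofList L).map (fun k => ((L.count k : Int))) := by
      show ((PySem.Dict.counter L).items.map (fun p => p.2)) = _
      rw [PySem.Dict.items_counter, List.map_map]
      rfl
    obtain ⟨m0, hm0⟩ : ∃ m0, PySem.List.max? ((PySem.Dict.counter L).values) (fun x => x) = some m0 := by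
      cases h : PySem.List.max? ((PySem.Dict.counter L).values) (fun x => x) with
      | none =>
        exfalso
        have := (PySem.List.max?_eq_none_iff _ _).mp h
        rw [hvals] at this
        rw [List.map_eq_nil_iff] at this
        rw [this] at hset
        simp at hset
      | some m => exact ⟨m, rfl⟩
    have hub : ∀ k ∈ L, (L.count k : Int) ≤ m0 := by
      intro k hk
      exact PySem.List.max?_isMax hm0 _
        (by rw [hvals]; exact List.mem_map.mpr ⟨k, (PySem.Set.mem_ofList L k).mpr hk, rfl⟩)
    obtain ⟨k0, hk0set, hk0⟩ := List.mem_map.mp (by rw [← hvals]; exact PySem.List.max?_mem hm0)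
    have hk0L : k0 ∈ L := (PySem.Set.mem_ofList L k0).mp hk0set
    obtain ⟨k1, hk1s, hk1c⟩ := exists_count_eq_runMax s hpair hsne
    have heq : m0 = (runMax s : Int) := by
      have h1 : m0 ≤ (runMax s : Int) := by
        rw [← hk0]
        have h := count_le_runMax s hpair k0 ((hmemLs k0).mp hk0L)
        rw [hcount k0]
        exact_mod_cast h
      have h2 : (runMax s : Int) ≤ m0 := by
        have h := hub k1 ((hmemLs k1).mpr hk1s)
        rw [hcount k1, hk1c] at h
        exact h
      omega
    rw [if_neg hitems, hm0]
    simp only [Option.getD_some]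
    rw [heq]
    by_cases hbig : 1 < runMax s
    · rw [if_pos (by exact_mod_cast hbig), if_pos hbig]
      apply List.Perm.map
      refine (List.perm_ext_iff_of_nodup ?_ ?_).mpr ?_
      · rw [PySem.Dict.keys_counter]
        exact (PySem.Set.nodup_ofList L).filter _
      · exact nodup_runHeads s hpair _
      · intro a
        rw [List.mem_filter, PySem.Dict.keys_counter, PySem.Set.mem_ofList,
          PySem.Dict.getD_counter, decide_eq_true_iff, mem_runHeads s hpair, hcount a, hmemLs a]
        constructor
        · rintro ⟨h1, h2⟩
          exact ⟨h1, by exact_mod_cast h2⟩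
        · rintro ⟨h1, h2⟩
          exact ⟨h1, by exact_mod_cast h2⟩
    · rw [if_neg (by exact_mod_cast hbig), if_neg hbig]
      rfl

-- ===== VERDICT (by name: the statement is the Claim_ definition above) =====
theorem solution_spec : Claim_equal_solution := by
  intro orders course _ _
  unfold Spec_solution
  rw [solution_eq, solution_alt_eq]
  exact (PySem.List.sorted_id_eq_sorted_id_iff_perm _ _).mpr
    (List.Perm.flatMap_left course (fun c _ => contrib_perm orders c))
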